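-- pv_equiv track=rewrite | github.com/cctbx/cctbx_project | libtbx/command_line/remove_unused_imports.py | remove_word_after_key
-- ===== SOURCE A (Python) =====
-- def remove_word_after_key(spl, word, key = None):
--   new_spl = []
--   found_key = (key is None)
--   for w in spl:
--     if w == key:
--       found_key = True
--     if (not found_key) or (w != word):
--       new_spl.append(w)
--     else:
--       pass # skip word after key is found
--   return new_spl
-- ===== SOURCE B (Python) =====
-- def remove_word_after_key(spl, word, key=None):
--   words = list(spl)
--   if key is None:
--     start = 0
--   else:
--     try:
--       start = words.index(key)
--     except ValueError:
--       start = len(words)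
--   return words[:start] + [w for w in words[start:] if w != word]
-- ===== Notes on version B (the rewrite author's own statement) =====
-- stated objective: simpler
-- what changed: Replaces the stateful found_key flag loop with a split-at-first-key decomposition: compute the index of the first key occurrence, keep the prefix verbatim and filter `word` out of the suffix.
import Mathlib
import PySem

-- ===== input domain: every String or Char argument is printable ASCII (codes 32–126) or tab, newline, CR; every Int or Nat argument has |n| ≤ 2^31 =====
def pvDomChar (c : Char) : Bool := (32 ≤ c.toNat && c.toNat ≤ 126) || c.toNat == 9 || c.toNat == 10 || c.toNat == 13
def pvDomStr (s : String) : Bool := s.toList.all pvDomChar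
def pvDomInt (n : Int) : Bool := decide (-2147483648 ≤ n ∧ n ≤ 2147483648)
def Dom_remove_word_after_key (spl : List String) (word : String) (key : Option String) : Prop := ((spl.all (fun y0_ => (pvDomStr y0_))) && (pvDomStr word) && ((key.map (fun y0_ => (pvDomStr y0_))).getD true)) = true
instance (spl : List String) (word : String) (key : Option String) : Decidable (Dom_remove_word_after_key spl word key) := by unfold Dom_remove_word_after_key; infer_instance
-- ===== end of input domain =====

-- B replaces A's stateful found_key flag loop by a split-at-first-key decomposition
-- (prefix kept verbatim, suffix filtered); same O(n) cost, simpler structure.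

-- ===== PORT A =====
-- the for-loop of A: state = found_key flag; appends become cons in order
def remove_word_after_key_go (word : String) (key : Option String) (found : Bool) : List String → List String
  | [] => []
  | w :: ws =>
    let found' := if some w = key then true else found
    if (!found') || (w ≠ word) then w :: remove_word_after_key_go word key found' ws
    else remove_word_after_key_go word key found' ws

def remove_word_after_key (spl : List String) (word : String) (key : Option String) : List String :=
  remove_word_after_key_go word key key.isNone spl

-- ===== PORT B =====
def remove_word_after_key_alt (spl : List String) (word : String) (key : Option String) : List String :=
  let start : Nat := match key with
    | none => 0
    | some k => spl.idxOf k   -- words.index(key), = len(words) when absent (try/except)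
  spl.take start ++ (spl.drop start).filter (fun w => w ≠ word)

-- ===== PRECONDITION & SPEC =====
def Spec_remove_word_after_key (spl : List String) (word : String) (key : Option String) (out : List String) : Prop := out = remove_word_after_key_alt spl word key
instance (spl : List String) (word : String) (key : Option String) (out : List String) : Decidable (Spec_remove_word_after_key spl word key out) := by unfold Spec_remove_word_after_key; infer_instance

-- ===== CLAIM (what is proved, stated in full; the proofs are below) =====
def Claim_equal_remove_word_after_key : Prop := ∀ (spl : List String) (word : String) (key : Option String), Dom_remove_word_after_key spl word key → Spec_remove_word_after_key spl word key (remove_word_after_key spl word key)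

-- ===== LEMMAS AND PROOFS =====

-- once the flag is set, the loop is a plain filter
theorem go_found (word : String) (key : Option String) (ws : List String) :
    remove_word_after_key_go word key true ws = ws.filter (fun w => w ≠ word) := by
  induction ws with
  | nil => rfl
  | cons w ws ih =>
    simp [remove_word_after_key_go, ih, List.filter]
    split_ifs <;> simp_all

-- before the flag is set (key present as `some k`), the loop keeps words until k, then filters
theorem go_notfound (word k : String) (ws : List String) :
    remove_word_after_key_go word (some k) false ws
      = ws.take (ws.idxOf k) ++ (ws.drop (ws.idxOf k)).filter (fun w => w ≠ word) := by
  induction ws with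
  | nil => rfl
  | cons w ws ih =>
    by_cases hwk : w = k
    · subst hwk
      simp [remove_word_after_key_go, List.idxOf_cons_self, go_found, List.filter]
      split_ifs <;> simp_all
    · have hbk : (w == k) = false := by simp [hwk]
      simp [remove_word_after_key_go, hwk, List.idxOf_cons, hbk, ih]

-- ===== VERDICT (by name: the statement is the Claim_ definition above) =====
theorem remove_word_after_key_spec : Claim_equal_remove_word_after_key := by
  intro spl word key _
  unfold Spec_remove_word_after_key remove_word_after_key remove_word_after_key_alt
  cases key with
  | none =>
    simp [go_found]
  | some k =>
    simp [go_notfound]
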